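-- pv_equiv track=rewrite | github.com/nxtexe/bookdrive | src/models/spider.py | sort_structure
-- ===== SOURCE A (Python) =====
-- def sort_structure(data, sort=True):
-- 	alpha = {}
-- 	for datum in data:
-- 		for key in datum:
-- 			if key[0] not in alpha:
-- 				alpha[key[0]] = {}
-- 			if key not in alpha[key[0]]:
-- 				alpha[key[0]][key] = []
-- 			if datum[key] not in alpha[key[0]][key]:
-- 				alpha[key[0]][key].append(datum[key])
-- 				if sort:
-- 					alpha[key[0]][key] = sorted(alpha[key[0]][key])
-- 	return alpha
-- ===== SOURCE B (Python) =====
-- def sort_structure(data, sort=True):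
-- 	# pass 1: flat table full-key -> unique values in first-seen order
-- 	flat = {}
-- 	for datum in data:
-- 		for key, value in datum.items():
-- 			bucket = flat.setdefault(key, [])
-- 			if value not in bucket:
-- 				bucket.append(value)
-- 	# pass 2: partition the flat table by first character, sorting each list once
-- 	alpha = {}
-- 	for key, values in flat.items():
-- 		group = alpha.setdefault(key[0], {})
-- 		group[key] = sorted(values) if sort else values
-- 	return alpha
-- ===== Notes on version B (the rewrite author's own statement) =====
-- stated objective: alternative
-- what changed: A's single fused nested loop that dedups and re-sorts inside the nested dict is replaced by two passes: one pass builds a flat full-key->unique-values table, a second pass partitions it by first character and sorts each list once.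
import Mathlib
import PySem

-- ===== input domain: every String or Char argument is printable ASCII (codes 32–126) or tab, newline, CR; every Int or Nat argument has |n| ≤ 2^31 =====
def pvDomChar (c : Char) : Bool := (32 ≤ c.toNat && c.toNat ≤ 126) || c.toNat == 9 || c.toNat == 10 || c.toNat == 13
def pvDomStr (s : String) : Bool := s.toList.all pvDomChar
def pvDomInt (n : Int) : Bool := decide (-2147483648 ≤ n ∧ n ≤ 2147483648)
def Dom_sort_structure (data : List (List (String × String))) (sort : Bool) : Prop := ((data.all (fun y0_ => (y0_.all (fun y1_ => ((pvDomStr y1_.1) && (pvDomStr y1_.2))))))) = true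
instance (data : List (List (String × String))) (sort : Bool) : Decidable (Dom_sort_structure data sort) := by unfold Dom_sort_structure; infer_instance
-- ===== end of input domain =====

-- B replaces A's fused nested loop (dedup + re-sort inline inside the nested dict) by a flat key→values
-- table built in one pass and a second regrouping pass that sorts each list once (objective: alternative).

-- ===== PORT A =====
-- key[0] as a 1-character Python string; exact for nonempty keys (Pre_ excludes key = "", where Python raises IndexError)
def keyOf (k : String) : String :=
  match PySem.Str.pyGet? k 0 with
  | some c => String.ofList [c]
  | none => ""

-- `sorted(vs)` when sort else vs (A's inline conditional re-sort; B's conditional final sort)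
def fsort (sort : Bool) (vs : List String) : List String :=
  if sort then PySem.List.sorted vs (fun x => x) else vs

-- body of A's inner loop: one key of one datum ('key in datum' iterates dict keys; datum[key] is kv.2).
-- Python mutates alpha[key[0]] in place; functionally we re-insert the bucket (insert overwrites keeping position).
def stepA (sort : Bool) (alpha : PySem.Dict String (PySem.Dict String (List String)))
    (kv : String × String) : PySem.Dict String (PySem.Dict String (List String)) :=
  let c := keyOf kv.1
  let alpha1 := if alpha.contains c = false then alpha.insert c PySem.Dict.empty else alpha
  let inner0 := alpha1.getD c PySem.Dict.empty
  let inner1 := if inner0.contains kv.1 = false then inner0.insert kv.1 [] else inner0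
  let vs := inner1.getD kv.1 []
  if kv.2 ∈ vs then alpha1.insert c inner1
  else alpha1.insert c (inner1.insert kv.1 (fsort sort (vs ++ [kv.2])))

def sort_structure (data : List (List (String × String))) (sort : Bool) :
    List (String × List (String × List String)) :=
  (data.foldl (fun alpha datum => ((PySem.Dict.ofList datum).items).foldl (stepA sort) alpha)
      PySem.Dict.empty).items.map (fun p => (p.1, p.2.items))

-- ===== PORT B =====
-- pass 1 body: bucket = flat.setdefault(key, []); if value not in bucket: bucket.append(value)
-- (for a fresh key the membership test on [] is False, so the append always follows the setdefault)
def flatStep (flat : PySem.Dict String (List String)) (kv : String × String) :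
    PySem.Dict String (List String) :=
  let bucket := flat.getD kv.1 []
  if kv.2 ∈ bucket then flat else flat.insert kv.1 (bucket ++ [kv.2])

-- pass 2 body: group = alpha.setdefault(key[0], {}); group[key] = sorted(values) if sort else values
def regroupStep (sort : Bool) (alpha : PySem.Dict String (PySem.Dict String (List String)))
    (p : String × List String) : PySem.Dict String (PySem.Dict String (List String)) :=
  let group := alpha.getD (keyOf p.1) PySem.Dict.empty
  alpha.insert (keyOf p.1) (group.insert p.1 (fsort sort p.2))

def sort_structure_alt (data : List (List (String × String))) (sort : Bool) :
    List (String × List (String × List String)) :=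
  let flat := data.foldl (fun flat datum => ((PySem.Dict.ofList datum).items).foldl flatStep flat)
      PySem.Dict.empty
  (flat.items.foldl (regroupStep sort) PySem.Dict.empty).items.map (fun p => (p.1, p.2.items))

-- ===== PRECONDITION & SPEC =====
-- Pre_ excludes data containing an empty key, on which Python's key[0] raises IndexError.
def Pre_sort_structure (data : List (List (String × String))) (sort : Bool) : Prop :=
  ∀ d ∈ data, ∀ p ∈ d, p.1 ≠ ""
instance (data : List (List (String × String))) (sort : Bool) : Decidable (Pre_sort_structure data sort) := by unfold Pre_sort_structure; infer_instance

def pvWitness_sort_structure : (List (List (String × String))) × Bool :=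
  ([[("ab", "2"), ("cd", "1")], [("ab", "1"), ("ae", "1")]], true)

def Spec_sort_structure (data : List (List (String × String))) (sort : Bool) (out : List (String × List (String × List String))) : Prop := out = sort_structure_alt data sort
instance (data : List (List (String × String))) (sort : Bool) (out : List (String × List (String × List String))) : Decidable (Spec_sort_structure data sort out) := by unfold Spec_sort_structure; infer_instance

-- ===== CLAIM (what is proved, stated in full; the proofs are below) =====
def Claim_equal_sort_structure : Prop := ∀ (data : List (List (String × String))) (sort : Bool), Dom_sort_structure data sort → Pre_sort_structure data sort → Spec_sort_structure data sort (sort_structure data sort)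

-- ===== LEMMAS AND PROOFS =====

-- abbreviation for B's second pass as a fold from an arbitrary accumulator
def Rg (sort : Bool) (L : List (String × List String))
    (alpha : PySem.Dict String (PySem.Dict String (List String))) :
    PySem.Dict String (PySem.Dict String (List String)) :=
  L.foldl (regroupStep sort) alpha

theorem Rg_cons (sort : Bool) (x : String × List String) (L : List (String × List String))
    (a : PySem.Dict String (PySem.Dict String (List String))) :
    Rg sort (x :: L) a = Rg sort L (regroupStep sort a x) := rfl

theorem Rg_append_singleton (sort : Bool) (L : List (String × List String))
    (x : String × List String) (a : PySem.Dict String (PySem.Dict String (List String))) :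
    Rg sort (L ++ [x]) a = regroupStep sort (Rg sort L a) x := by
  simp [Rg, List.foldl_append]

theorem mem_fsort (sort : Bool) (v : String) (l : List String) : v ∈ fsort sort l ↔ v ∈ l := by
  cases sort <;> simp [fsort, PySem.List.mem_sorted]

theorem fsort_fsort_append (sort : Bool) (l : List String) (v : String) :
    fsort sort (fsort sort l ++ [v]) = fsort sort (l ++ [v]) := by
  cases sort
  · simp [fsort]
  · simp only [fsort, if_true]
    exact PySem.List.sorted_eq_sorted_of_perm _ _ _ (fun a b h => h)
      ((PySem.List.sorted_perm l (fun x => x) false).append_right [v])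

theorem not_beq_of_not_contains {κ ν : Type} [BEq κ] [LawfulBEq κ] {d : PySem.Dict κ ν} {k : κ}
    (h : d.contains k = false) : ∀ p ∈ d.items, (p.1 == k) = false := by
  intro p hp
  by_contra hb
  have : p.1 = k := by simpa using eq_of_beq (by revert hb; cases p.1 == k <;> simp)
  have : k ∈ d.keys := by
    simp only [PySem.Dict.keys]
    exact this ▸ List.mem_map_of_mem hp
  rw [← PySem.Dict.contains_iff_mem_keys] at this
  simp [h] at this

theorem insert_insert_same {κ ν : Type} [BEq κ] [LawfulBEq κ] (d : PySem.Dict κ ν) (k : κ) (x y : ν) :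
    (d.insert k x).insert k y = d.insert k y := by
  apply PySem.Dict.ext
  have hc : (d.insert k x).contains k = true := by simp
  rw [PySem.Dict.items_insert_of_contains _ _ hc]
  by_cases h : d.contains k = true
  · rw [PySem.Dict.items_insert_of_contains _ _ h, PySem.Dict.items_insert_of_contains _ _ h,
      List.map_map]
    apply List.map_congr_left
    intro p _
    by_cases hp : (p.1 == k) = true <;> simp [hp, Function.comp]
  · have hf : d.contains k = false := eq_false_of_ne_true h
    rw [PySem.Dict.items_insert_of_not_contains _ x hf,
      PySem.Dict.items_insert_of_not_contains _ y hf, List.map_append]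
    have hall := not_beq_of_not_contains hf
    rw [show List.map (fun p => if (p.1 == k) = true then (k, y) else p) d.items
        = List.map id d.items from List.map_congr_left (fun p hp => by simp [hall p hp]),
      List.map_id]
    simp

theorem insert_comm_left {κ ν : Type} [BEq κ] [LawfulBEq κ] (d : PySem.Dict κ ν) {k k' : κ} (x y : ν)
    (hne : k ≠ k') (hk : d.contains k = true) :
    (d.insert k x).insert k' y = (d.insert k' y).insert k x := by
  apply PySem.Dict.ext
  have hkx : (d.insert k' y).contains k = true := by simp [PySem.Dict.contains_insert, hk]
  have e1 : (k == k') = false := beq_eq_false_iff_ne.mpr hne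
  have e2 : (k' == k) = false := beq_eq_false_iff_ne.mpr (Ne.symm hne)
  by_cases h : d.contains k' = true
  · have h2 : (d.insert k x).contains k' = true := by simp [PySem.Dict.contains_insert, h]
    rw [PySem.Dict.items_insert_of_contains _ y h2, PySem.Dict.items_insert_of_contains _ x hk,
      PySem.Dict.items_insert_of_contains _ x hkx, PySem.Dict.items_insert_of_contains _ y h,
      List.map_map, List.map_map]
    apply List.map_congr_left
    intro p _
    by_cases hp : p.1 = k
    · simp [Function.comp, hp, e1]
    · by_cases hp' : p.1 = k'
      · simp [Function.comp, hp', e2]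
      · simp [Function.comp, beq_eq_false_iff_ne.mpr hp, beq_eq_false_iff_ne.mpr hp']
  · have hf : d.contains k' = false := eq_false_of_ne_true h
    have h2 : (d.insert k x).contains k' = false := by
      rw [PySem.Dict.contains_insert]
      simp [hf, e2]
    rw [PySem.Dict.items_insert_of_not_contains _ y h2, PySem.Dict.items_insert_of_contains _ x hk,
      PySem.Dict.items_insert_of_contains _ x hkx, PySem.Dict.items_insert_of_not_contains _ y hf,
      List.map_append]
    simp [e2]

theorem insert_get?_self {κ ν : Type} [BEq κ] [LawfulBEq κ] (d : PySem.Dict κ ν) {k : κ} {w : ν}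
    (h : d.get? k = some w) (hn : d.keys.Nodup) : d.insert k w = d := by
  apply PySem.Dict.ext
  have hc : d.contains k = true := by rw [PySem.Dict.contains_eq_isSome_get?, h]; rfl
  rw [PySem.Dict.items_insert_of_contains _ _ hc,
    show List.map (fun p => if (p.1 == k) = true then (k, w) else p) d.items
      = List.map id d.items from ?_, List.map_id]
  apply List.map_congr_left
  intro p hp
  by_cases hb : (p.1 == k) = true
  · have hk : p.1 = k := eq_of_beq hb
    have hw : d.getD k w = p.2 := PySem.Dict.getD_of_mem_items d (hk ▸ hp) hn w
    rw [PySem.Dict.getD_of_get?_eq_some _ _ h] at hw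
    rw [hw, ← hk]
    simp
  · simp [hb]

theorem contains_of_inner {alpha : PySem.Dict String (PySem.Dict String (List String))} {c k : String}
    {w : List String} (h : ((alpha.getD c PySem.Dict.empty).get? k) = some w) :
    alpha.contains c = true := by
  by_contra hc
  rw [PySem.Dict.getD_of_not_contains _ _ (eq_false_of_ne_true hc)] at h
  simp [PySem.Dict.get?_empty] at h

theorem innerGet_regroupStep (sort : Bool) (alpha : PySem.Dict String (PySem.Dict String (List String)))
    (q : String × List String) (c k : String) (h : q.1 ≠ k) :
    ((regroupStep sort alpha q).getD c PySem.Dict.empty).get? k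
      = (alpha.getD c PySem.Dict.empty).get? k := by
  simp only [regroupStep]
  by_cases hcc : c = keyOf q.1
  · subst hcc
    rw [PySem.Dict.getD_insert_self, PySem.Dict.get?_insert_of_ne _ _ (Ne.symm h)]
  · rw [PySem.Dict.getD_insert_of_ne _ _ _ hcc]

theorem innerGet_Rg (sort : Bool) (L : List (String × List String))
    (alpha : PySem.Dict String (PySem.Dict String (List String))) (c k : String)
    (h : ∀ q ∈ L, q.1 ≠ k) :
    ((Rg sort L alpha).getD c PySem.Dict.empty).get? k
      = (alpha.getD c PySem.Dict.empty).get? k := by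
  induction L generalizing alpha with
  | nil => rfl
  | cons q rest ih =>
      rw [Rg, List.foldl_cons, ← Rg, ih _ (fun q hq => h q (List.mem_cons_of_mem _ hq)),
        innerGet_regroupStep _ _ _ _ _ (h q (List.mem_cons_self))]

theorem nodup_keys_Rg (sort : Bool) (L : List (String × List String))
    (alpha : PySem.Dict String (PySem.Dict String (List String))) (h : alpha.keys.Nodup) :
    (Rg sort L alpha).keys.Nodup := by
  induction L generalizing alpha with
  | nil => exact h
  | cons q rest ih =>
      rw [Rg, List.foldl_cons, ← Rg]
      exact ih _ (by simp only [regroupStep]; exact PySem.Dict.nodup_keys_insert _ _ _ h)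

theorem regroupStep_comm (sort : Bool) (alpha : PySem.Dict String (PySem.Dict String (List String)))
    (q : String × List String) (k : String) (V : List String) {w0 : List String}
    (hq : q.1 ≠ k) (h : ((alpha.getD (keyOf k) PySem.Dict.empty).get? k) = some w0) :
    regroupStep sort (alpha.insert (keyOf k) ((alpha.getD (keyOf k) PySem.Dict.empty).insert k V)) q
      = (regroupStep sort alpha q).insert (keyOf k)
          (((regroupStep sort alpha q).getD (keyOf k) PySem.Dict.empty).insert k V) := by
  have hck : alpha.contains (keyOf k) = true := contains_of_inner h
  have hkg : (alpha.getD (keyOf k) PySem.Dict.empty).contains k = true := by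
    rw [PySem.Dict.contains_eq_isSome_get?, h]; rfl
  simp only [regroupStep]
  by_cases hcc : keyOf q.1 = keyOf k
  · rw [hcc, PySem.Dict.getD_insert_self, insert_insert_same, PySem.Dict.getD_insert_self,
      insert_insert_same, insert_comm_left _ _ _ (Ne.symm hq) hkg]
  · rw [PySem.Dict.getD_insert_of_ne _ _ _ hcc,
      PySem.Dict.getD_insert_of_ne _ _ _ (fun hh => hcc hh.symm),
      insert_comm_left _ _ _ (fun hh => hcc hh.symm) hck]

theorem commute_C (sort : Bool) (rest : List (String × List String))
    (alpha : PySem.Dict String (PySem.Dict String (List String))) (k v : String) (l : List String)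
    (hrest : ∀ q ∈ rest, q.1 ≠ k)
    (h : ((alpha.getD (keyOf k) PySem.Dict.empty).get? k) = some (fsort sort l))
    (hv : v ∉ l) :
    stepA sort (Rg sort rest alpha) (k, v)
      = Rg sort rest (alpha.insert (keyOf k)
          ((alpha.getD (keyOf k) PySem.Dict.empty).insert k (fsort sort (l ++ [v])))) := by
  induction rest generalizing alpha with
  | nil =>
      have hck : alpha.contains (keyOf k) = true := contains_of_inner h
      have hkg : (alpha.getD (keyOf k) PySem.Dict.empty).contains k = true := by
        rw [PySem.Dict.contains_eq_isSome_get?, h]; rfl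
      simp only [Rg, List.foldl_nil, stepA, hck, hkg, Bool.true_eq_false, if_false]
      rw [PySem.Dict.getD_of_get?_eq_some _ _ h]
      rw [if_neg (by rw [mem_fsort]; exact hv), fsort_fsort_append]
  | cons q rest ih =>
      rw [Rg_cons, Rg_cons,
        ih (regroupStep sort alpha q) (fun p hp => hrest p (List.mem_cons_of_mem _ hp))
          (by rw [innerGet_regroupStep _ _ _ _ _ (hrest q List.mem_cons_self)]; exact h)]
      congr 1
      exact (regroupStep_comm sort alpha q k _ (hrest q List.mem_cons_self) h).symm

theorem lookup_G (sort : Bool) (L : List (String × List String))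
    (alpha : PySem.Dict String (PySem.Dict String (List String))) (k : String) (l : List String)
    (hmem : (k, l) ∈ L) (hnd : (L.map (·.1)).Nodup)
    (h0 : ((alpha.getD (keyOf k) PySem.Dict.empty).get? k) = none) :
    ((Rg sort L alpha).getD (keyOf k) PySem.Dict.empty).get? k = some (fsort sort l) := by
  induction L generalizing alpha with
  | nil => cases hmem
  | cons p rest ih =>
      simp only [List.map_cons, List.nodup_cons] at hnd
      by_cases hpk : p.1 = k
      · have hp : p = (k, l) := by
          rcases List.mem_cons.mp hmem with hh | hh
          · exact hh.symm
          · exact absurd (hpk ▸ List.mem_map_of_mem (f := (·.1)) hh) hnd.1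
        subst hp
        rw [Rg_cons,
          innerGet_Rg sort rest _ _ k (fun q hq hqk => hnd.1 (hqk ▸ List.mem_map_of_mem (f := (·.1)) hq))]
        simp only [regroupStep]
        rw [PySem.Dict.getD_insert_self, PySem.Dict.get?_insert_self]
      · have hmem' : (k, l) ∈ rest := by
          rcases List.mem_cons.mp hmem with hh | hh
          · exact absurd (by rw [← hh]) hpk
          · exact hh
        rw [Rg_cons]
        exact ih _ hmem' hnd.2
          (by rw [innerGet_regroupStep _ _ _ _ _ hpk]; exact h0)

theorem update_U (sort : Bool) (L : List (String × List String))
    (alpha : PySem.Dict String (PySem.Dict String (List String))) (k v : String) (l : List String)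
    (hmem : (k, l) ∈ L) (hnd : (L.map (·.1)).Nodup)
    (h0 : ((alpha.getD (keyOf k) PySem.Dict.empty).get? k) = none) (hv : v ∉ l) :
    stepA sort (Rg sort L alpha) (k, v)
      = Rg sort (L.map (fun p => if p.1 == k then (k, l ++ [v]) else p)) alpha := by
  induction L generalizing alpha with
  | nil => cases hmem
  | cons p rest ih =>
      simp only [List.map_cons, List.nodup_cons] at hnd
      by_cases hpk : p.1 = k
      · have hp : p = (k, l) := by
          rcases List.mem_cons.mp hmem with hh | hh
          · exact hh.symm
          · exact absurd (hpk ▸ List.mem_map_of_mem (f := (·.1)) hh) hnd.1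
        subst hp
        have hrest : ∀ q ∈ rest, q.1 ≠ k :=
          fun q hq hqk => hnd.1 (hqk ▸ List.mem_map_of_mem (f := (·.1)) hq)
        have hinner : (((regroupStep sort alpha (k, l)).getD (keyOf k) PySem.Dict.empty).get? k)
            = some (fsort sort l) := by
          simp only [regroupStep]
          rw [PySem.Dict.getD_insert_self, PySem.Dict.get?_insert_self]
        rw [List.map_cons, if_pos (by simp),
          List.map_congr_left (fun q hq => if_neg (by simp [hrest q hq])), show List.map (fun p : String × List String => p) rest = rest from List.map_id rest,
          Rg_cons, Rg_cons, commute_C sort rest _ k v l hrest hinner hv]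
        congr 1
        simp only [regroupStep]
        rw [PySem.Dict.getD_insert_self, insert_insert_same, insert_insert_same]
      · have hmem' : (k, l) ∈ rest := by
          rcases List.mem_cons.mp hmem with hh | hh
          · exact absurd (by rw [← hh]) hpk
          · exact hh
        rw [List.map_cons, if_neg (by simp [hpk]), Rg_cons, Rg_cons]
        exact ih _ hmem' hnd.2 (by rw [innerGet_regroupStep _ _ _ _ _ hpk]; exact h0)

theorem nodup_keys_flatStep (flat : PySem.Dict String (List String)) (kv : String × String)
    (h : flat.keys.Nodup) : (flatStep flat kv).keys.Nodup := by
  simp only [flatStep]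
  split
  · exact h
  · exact PySem.Dict.nodup_keys_insert _ _ _ h

theorem nodup_keys_flatFold (es : List (String × String)) (flat : PySem.Dict String (List String))
    (h : flat.keys.Nodup) : (es.foldl flatStep flat).keys.Nodup := by
  induction es generalizing flat with
  | nil => exact h
  | cons kv es ih => exact ih _ (nodup_keys_flatStep flat kv h)

theorem main_step (sort : Bool) (flat : PySem.Dict String (List String)) (k v : String)
    (hnd : flat.keys.Nodup) :
    stepA sort (Rg sort flat.items PySem.Dict.empty) (k, v)
      = Rg sort (flatStep flat (k, v)).items PySem.Dict.empty := by
  have hnd' : (flat.items.map (·.1)).Nodup := by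
    simpa only [PySem.Dict.keys] using hnd
  have hRnd : (Rg sort flat.items (PySem.Dict.empty)).keys.Nodup :=
    nodup_keys_Rg sort _ _ PySem.Dict.nodup_keys_empty
  cases h : flat.get? k with
  | none =>
      have hcont : flat.contains k = false := by rw [PySem.Dict.contains_eq_isSome_get?, h]; rfl
      have hknot : ∀ q ∈ flat.items, q.1 ≠ k := by
        intro q hq hqk
        rw [PySem.Dict.get?_eq_none_iff_not_mem_keys] at h
        exact h (by simp only [PySem.Dict.keys]; exact hqk ▸ List.mem_map_of_mem (f := (·.1)) hq)
      have hin : ((Rg sort flat.items PySem.Dict.empty).getD (keyOf k)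
          PySem.Dict.empty).get? k = none := by
        rw [innerGet_Rg sort _ _ _ _ hknot]
        simp [PySem.Dict.getD_empty, PySem.Dict.get?_empty]
      have hstep : flatStep flat (k, v) = flat.insert k ([] ++ [v]) := by
        simp only [flatStep]
        rw [PySem.Dict.getD_of_not_contains _ _ hcont]
        simp
      rw [hstep, PySem.Dict.items_insert_of_not_contains _ _ hcont, Rg_append_singleton]
      set α0 := Rg sort flat.items (PySem.Dict.empty : PySem.Dict String (PySem.Dict String (List String))) with hα0
      have hinc : (α0.getD (keyOf k) PySem.Dict.empty).contains k = false := by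
        rw [PySem.Dict.contains_eq_isSome_get?, hin]; rfl
      simp only [stepA, regroupStep]
      split_ifs with h1 h2 h3 h4 h5 <;>
        simp only [PySem.Dict.getD_insert_self, PySem.Dict.getD_empty,
          PySem.Dict.contains_empty, List.nil_append, List.mem_nil_iff,
          insert_insert_same] at * <;>
        first
          | rfl
          | rw [PySem.Dict.getD_of_not_contains _ _ h1]
  | some l =>
      have hcont : flat.contains k = true := by rw [PySem.Dict.contains_eq_isSome_get?, h]; rfl
      have hmem : (k, l) ∈ flat.items := PySem.Dict.mem_items_of_get?_eq_some flat h
      by_cases hv : v ∈ l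
      · have hstep : flatStep flat (k, v) = flat := by
          simp only [flatStep]
          rw [PySem.Dict.getD_of_get?_eq_some _ _ h, if_pos hv]
        rw [hstep]
        have hlook := lookup_G sort flat.items PySem.Dict.empty k l hmem hnd'
          (by simp [PySem.Dict.getD_empty, PySem.Dict.get?_empty])
        set α0 := Rg sort flat.items (PySem.Dict.empty : PySem.Dict String (PySem.Dict String (List String))) with hα0
        have hck : α0.contains (keyOf k) = true := contains_of_inner hlook
        have hkg : (α0.getD (keyOf k) PySem.Dict.empty).contains k = true := by
          rw [PySem.Dict.contains_eq_isSome_get?, hlook]; rfl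
        simp only [stepA, hck, hkg, Bool.true_eq_false, if_false]
        rw [PySem.Dict.getD_of_get?_eq_some _ _ hlook, if_pos ((mem_fsort sort v l).mpr hv)]
        obtain ⟨G, hG⟩ : ∃ G, α0.get? (keyOf k) = some G := by
          rw [PySem.Dict.contains_eq_isSome_get?] at hck
          exact Option.isSome_iff_exists.mp hck
        rw [PySem.Dict.getD_eq_get?_getD, hG]
        exact insert_get?_self α0 hG hRnd
      · have hstep : flatStep flat (k, v) = flat.insert k (l ++ [v]) := by
          simp only [flatStep]
          rw [PySem.Dict.getD_of_get?_eq_some _ _ h, if_neg hv]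
        rw [hstep, PySem.Dict.items_insert_of_contains _ _ hcont]
        exact update_U sort flat.items PySem.Dict.empty k v l hmem hnd'
          (by simp [PySem.Dict.getD_empty, PySem.Dict.get?_empty]) hv

theorem events_fold (sort : Bool) (es : List (String × String)) (flat : PySem.Dict String (List String))
    (hnd : flat.keys.Nodup) :
    es.foldl (stepA sort) (Rg sort flat.items PySem.Dict.empty)
      = Rg sort (es.foldl flatStep flat).items PySem.Dict.empty := by
  induction es generalizing flat with
  | nil => rfl
  | cons kv es ih =>
      rw [List.foldl_cons, List.foldl_cons, main_step sort flat kv.1 kv.2 hnd,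
        ih _ (nodup_keys_flatStep flat kv hnd)]

theorem data_fold (sort : Bool) (data : List (List (String × String)))
    (flat : PySem.Dict String (List String)) (hnd : flat.keys.Nodup) :
    data.foldl (fun alpha datum => ((PySem.Dict.ofList datum).items).foldl (stepA sort) alpha)
        (Rg sort flat.items PySem.Dict.empty)
      = Rg sort ((data.foldl (fun f datum => ((PySem.Dict.ofList datum).items).foldl flatStep f)
          flat)).items PySem.Dict.empty := by
  induction data generalizing flat with
  | nil => rfl
  | cons d rest ih =>
      rw [List.foldl_cons, List.foldl_cons, events_fold sort _ flat hnd,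
        ih _ (nodup_keys_flatFold _ flat hnd)]

-- ===== VERDICT (by name: the statement is the Claim_ definition above) =====
theorem sort_structure_spec : Claim_equal_sort_structure := by
  intro data sort _ _
  unfold Spec_sort_structure sort_structure sort_structure_alt
  have h := data_fold sort data PySem.Dict.empty PySem.Dict.nodup_keys_empty
  simp only [Rg] at h
  rw [show (PySem.Dict.empty : PySem.Dict String (List String)).items = [] from rfl,
    List.foldl_nil] at h
  rw [h]
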